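-- pv_equiv track=rewrite | github.com/HPAI-BSC/chromoplexy_analysis | src/graph_builder.py | generateVertices
-- ===== SOURCE A (Python) =====
-- def generateVertices(breaks, max_distance):
--     '''
--     Computes the vertices that exist within a list of chromosomic breaks. Each vertex contains a list of breaks.
--     Once the first one is assigned, other may be added if these are within max_distance of the previous one.
--     Input:
--         breaks: dictionary {str:[int]}, where keys are chromosome ids
--             and the corresponding non-empty list contains the position of breaks in that chromosome (sorted).
--         max_distance: int, Breaks closer than max_distance are added to the same vertex.
--     Output:
--         vertex_labels: [str]. List of vertices generated.
--             The value in position x indicates the chromosome that vertex belongs to.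
--         vertex_ranges: [(int,int)]. List of vertices generated.
--             The value in position x indicates the range of values of that vertex. That is:
--                 (first_break - max_distance, last_break + max_distance)
--     '''
--     #Create variables
--     vertex_labels, vertex_ranges = list(), list()
--     #For each chromosome in the dictionary
--     for chromosome in breaks.keys():
--         #Initialize the first vertex with the first break
--         first_break = breaks[chromosome][0]
--         current_break = breaks[chromosome][0]
--         #Process the rest of breaks, if any
--         for b in breaks[chromosome][1:]:
--             #If the next break is within max_distance, add it to the vertex
--             if b <= current_break + max_distance:
--                 current_break = b
--             #Otherwise, the vertex is ended. Store and initialize the next one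
--             else:
--                 #Store the vertex label and its range
--                 vertex_labels.append(chromosome)
--                 #TODO: This may cause ranges larger than the full chromosome length. Add min with constant provided by LS. Continues below.
--                 vertex_ranges.append((max(first_break - max_distance,0), current_break + max_distance))
--                 #Initialize the next vertex
--                 first_break, current_break = b, b
--         #Store the last vertex
--         vertex_labels.append(chromosome)
--         #TODO: Same as above
--         vertex_ranges.append((max(first_break - max_distance,0), current_break + max_distance))
--     return vertex_labels, vertex_ranges
-- ===== SOURCE B (Python) =====
-- def generateVertices(breaks, max_distance):
--     vertex_labels, vertex_ranges = list(), list()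
--     for chromosome, pos in breaks.items():
--         # indices where a new vertex starts (gap to the previous break too large)
--         bounds = [i for i in range(1, len(pos)) if pos[i] > pos[i - 1] + max_distance]
--         starts = [0] + bounds
--         ends = bounds + [len(pos)]
--         for a, b in zip(starts, ends):
--             vertex_labels.append(chromosome)
--             vertex_ranges.append((max(pos[a] - max_distance, 0), pos[b - 1] + max_distance))
--     return vertex_labels, vertex_ranges
-- ===== Notes on version B (the rewrite author's own statement) =====
-- stated objective: alternative
-- what changed: B replaces A's stateful scan (first_break/current_break accumulator with in-loop appends) by a boundary-index decomposition: per chromosome it first computes the list of indices where the gap exceeds max_distance, then emits one vertex per (start,end) index window via zip.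
import Mathlib
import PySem

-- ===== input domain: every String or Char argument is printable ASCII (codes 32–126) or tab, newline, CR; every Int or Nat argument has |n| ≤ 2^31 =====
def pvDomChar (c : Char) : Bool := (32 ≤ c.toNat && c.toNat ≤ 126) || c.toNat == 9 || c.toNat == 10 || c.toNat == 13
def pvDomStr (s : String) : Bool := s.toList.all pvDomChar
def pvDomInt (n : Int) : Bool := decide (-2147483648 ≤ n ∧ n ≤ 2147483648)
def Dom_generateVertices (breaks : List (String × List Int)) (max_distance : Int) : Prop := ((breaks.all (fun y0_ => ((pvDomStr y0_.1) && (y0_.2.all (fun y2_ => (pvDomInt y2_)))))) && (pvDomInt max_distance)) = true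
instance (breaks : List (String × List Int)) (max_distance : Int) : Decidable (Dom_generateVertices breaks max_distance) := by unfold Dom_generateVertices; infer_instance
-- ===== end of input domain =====

-- B replaces A's stateful scan (first_break/current_break accumulator) by a boundary-index
-- decomposition: per chromosome it computes the indices where the gap exceeds max_distance and
-- emits one vertex per (start,end) window (objective: alternative; same O(n) cost).

-- ===== PORT A =====
-- Transliteration of A: the dict is an assoc list; 'for chromosome in breaks.keys()' with the
-- lookups 'breaks[chromosome]' is the fold over the (key, value) pairs. 'pos[0]' raises
-- IndexError on an empty value list (excluded by Pre_); the '[] => acc' branch is that case,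
-- and 'h :: t' gives pos[0] = h and pos[1:] = t.
def generateVertices (breaks : List (String × List Int)) (max_distance : Int) :
    List String × (List (Int × Int)) :=
  breaks.foldl
    (fun acc kv =>
      match kv.2 with
      | [] => acc  -- Python raises IndexError here; outside Pre_
      | h :: t =>
        let st :=
          t.foldl
            (fun (s : List String × List (Int × Int) × Int × Int) b =>
              if b ≤ s.2.2.2 + max_distance then (s.1, s.2.1, s.2.2.1, b)
              else (s.1 ++ [kv.1],
                    s.2.1 ++ [(max (s.2.2.1 - max_distance) 0, s.2.2.2 + max_distance)],
                    b, b))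
            (acc.1, acc.2, h, h)
        (st.1 ++ [kv.1],
         st.2.1 ++ [(max (st.2.2.1 - max_distance) 0, st.2.2.2 + max_distance)]))
    ([], [])

-- ===== PORT B =====
-- Transliteration of Source B. pyGetD's default 0 is never used under Pre_: all indices produced by
-- the windows are in range for a nonempty pos (Python raises only for an empty pos, outside Pre_).
def generateVertices_alt (breaks : List (String × List Int)) (max_distance : Int) :
    List String × (List (Int × Int)) :=
  breaks.foldl
    (fun acc kv =>
      let pos := kv.2
      let bounds := (PySem.List.pyRange 1 (pos.length : Int) 1).filter
        (fun i => PySem.List.pyGetD pos i 0 > PySem.List.pyGetD pos (i - 1) 0 + max_distance)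
      let starts := (0 : Int) :: bounds
      let ends := bounds ++ [(pos.length : Int)]
      (starts.zip ends).foldl
        (fun acc2 ab =>
          (acc2.1 ++ [kv.1],
           acc2.2 ++ [(max (PySem.List.pyGetD pos ab.1 0 - max_distance) 0,
                       PySem.List.pyGetD pos (ab.2 - 1) 0 + max_distance)]))
        acc)
    ([], [])

-- ===== PRECONDITION & SPEC =====
-- Pre_ excludes exactly the inputs where some chromosome's break list is empty:
-- there Python A raises IndexError on breaks[chromosome][0] (and Python B on pos[a]).
def Pre_generateVertices (breaks : List (String × List Int)) (max_distance : Int) : Prop :=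
  ∀ kv ∈ breaks, kv.2 ≠ []
instance (breaks : List (String × List Int)) (max_distance : Int) :
    Decidable (Pre_generateVertices breaks max_distance) := by
  unfold Pre_generateVertices; infer_instance

def pvWitness_generateVertices : (List (String × List Int)) × Int :=
  ([("chr1", [1, 3, 20]), ("chr2", [5])], 4)

def Spec_generateVertices (breaks : List (String × List Int)) (max_distance : Int)
    (out : List String × (List (Int × Int))) : Prop :=
  out = generateVertices_alt breaks max_distance
instance (breaks : List (String × List Int)) (max_distance : Int)
    (out : List String × (List (Int × Int))) :
    Decidable (Spec_generateVertices breaks max_distance out) := by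
  unfold Spec_generateVertices; infer_instance

-- ===== CLAIM (what is proved, stated in full; the proofs are below) =====
def Claim_equal_generateVertices : Prop :=
  ∀ (breaks : List (String × List Int)) (max_distance : Int),
    Dom_generateVertices breaks max_distance →
    Pre_generateVertices breaks max_distance →
    Spec_generateVertices breaks max_distance (generateVertices breaks max_distance)

-- ===== LEMMAS AND PROOFS =====

-- the (first_break, last_break) pair of each vertex, as A's scan delimits them
def segFL (md : Int) : Int → Int → List Int → List (Int × Int)
  | f, c, [] => [(f, c)]
  | f, c, b :: t => if b ≤ c + md then segFL md f b t else (f, c) :: segFL md b b t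

def rangeFn (md : Int) (p : Int × Int) : Int × Int := (max (p.1 - md) 0, p.2 + md)

def pairFn (pos : List Int) (ab : Int × Int) : Int × Int :=
  (PySem.List.pyGetD pos ab.1 0, PySem.List.pyGetD pos (ab.2 - 1) 0)

-- zip (s :: bs) (bs ++ [n]) seen structurally
def windows : Int → List Int → Int → List (Int × Int)
  | s, [], n => [(s, n)]
  | s, a :: bs, n => (s, a) :: windows a bs n

def bnd (md : Int) (pos : List Int) : List Int :=
  (PySem.List.pyRange 1 (pos.length : Int) 1).filter
    (fun i => PySem.List.pyGetD pos i 0 > PySem.List.pyGetD pos (i - 1) 0 + md)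

def innerA (md : Int) (chrom : String)
    (s : List String × List (Int × Int) × Int × Int) (b : Int) :
    List String × List (Int × Int) × Int × Int :=
  if b ≤ s.2.2.2 + md then (s.1, s.2.1, s.2.2.1, b)
  else (s.1 ++ [chrom], s.2.1 ++ [(max (s.2.2.1 - md) 0, s.2.2.2 + md)], b, b)

def stepA (md : Int) (acc : List String × List (Int × Int)) (kv : String × List Int) :
    List String × List (Int × Int) :=
  match kv.2 with
  | [] => acc
  | h :: t =>
    let st := t.foldl (innerA md kv.1) (acc.1, acc.2, h, h)
    (st.1 ++ [kv.1], st.2.1 ++ [(max (st.2.2.1 - md) 0, st.2.2.2 + md)])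

def stepB (md : Int) (acc : List String × List (Int × Int)) (kv : String × List Int) :
    List String × List (Int × Int) :=
  ((0 :: bnd md kv.2).zip (bnd md kv.2 ++ [(kv.2.length : Int)])).foldl
    (fun acc2 ab =>
      (acc2.1 ++ [kv.1],
       acc2.2 ++ [(max (PySem.List.pyGetD kv.2 ab.1 0 - md) 0,
                   PySem.List.pyGetD kv.2 (ab.2 - 1) 0 + md)]))
    acc

lemma genA_eq_foldl (breaks : List (String × List Int)) (md : Int) :
    generateVertices breaks md = breaks.foldl (stepA md) ([], []) := rfl

lemma genB_eq_foldl (breaks : List (String × List Int)) (md : Int) :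
    generateVertices_alt breaks md = breaks.foldl (stepB md) ([], []) := rfl

lemma zip_windows (bs : List Int) (s n : Int) :
    (s :: bs).zip (bs ++ [n]) = windows s bs n := by
  induction bs generalizing s with
  | nil => rfl
  | cons a bs ih =>
    show (s :: a :: bs).zip (a :: (bs ++ [n])) = (s, a) :: windows a bs n
    rw [List.zip_cons_cons, ih a]

lemma pyGetD_cons_shift (x : Int) (l : List Int) (i : Int) (hi : 0 ≤ i) :
    PySem.List.pyGetD (x :: l) (i + 1) 0 = PySem.List.pyGetD l i 0 := by
  obtain ⟨n, rfl⟩ : ∃ n : ℕ, i = (n : Int) := ⟨i.toNat, (Int.toNat_of_nonneg hi).symm⟩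
  simp [PySem.List.pyGetD, PySem.List.pyGet?_cons_succ]

lemma windows_shift (bs : List Int) (s n : Int) :
    windows (s + 1) (bs.map (· + 1)) (n + 1)
      = (windows s bs n).map (fun ab => (ab.1 + 1, ab.2 + 1)) := by
  induction bs generalizing s with
  | nil => rfl
  | cons a bs ih => simp [windows, ih a]

lemma windows_mem (bs : List Int) (s n : Int) :
    ∀ p ∈ windows s bs n, (p.1 = s ∨ p.1 ∈ bs) ∧ (p.2 ∈ bs ∨ p.2 = n) := by
  induction bs generalizing s with
  | nil =>
    intro p hp
    have : p = (s, n) := by simpa [windows] using hp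
    subst this; simp
  | cons a bs ih =>
    intro p hp
    rcases List.mem_cons.mp hp with rfl | hp
    · simp
    · obtain ⟨h1, h2⟩ := ih a p hp
      refine ⟨Or.inr ?_, ?_⟩
      · rcases h1 with h1 | h1 <;> simp [h1]
      · rcases h2 with h2 | h2 <;> simp [h2]

lemma segFL_exists (md c : Int) (t : List Int) :
    ∃ z r, ∀ f, segFL md f c t = (f, z) :: r := by
  induction t generalizing c with
  | nil => exact ⟨c, [], fun f => rfl⟩
  | cons b t ih =>
    by_cases hb : b ≤ c + md
    · obtain ⟨z, r, h⟩ := ih b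
      exact ⟨z, r, fun f => by simp [segFL, hb, h f]⟩
    · exact ⟨c, segFL md b b t, fun f => by simp [segFL, hb]⟩

lemma windows_map_first (pf : Int × Int → Int × Int) (bs : List Int) (n s s' : Int) :
    ∃ y rest, (windows s bs n).map pf = pf (s, y) :: rest ∧
      (windows s' bs n).map pf = pf (s', y) :: rest := by
  cases bs with
  | nil => exact ⟨n, [], rfl, rfl⟩
  | cons a bs => exact ⟨a, (windows a bs n).map pf, rfl, rfl⟩

lemma pyRange_shift (a b : Int) :
    PySem.List.pyRange (a + 1) (b + 1) 1 = (PySem.List.pyRange a b 1).map (· + 1) := by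
  rw [PySem.List.pyRange_one, PySem.List.pyRange_one, List.map_map]
  have : b + 1 - (a + 1) = b - a := by ring
  rw [this]
  apply List.map_congr_left
  intro k _
  simp [Function.comp]
  ring

lemma bnd_mem (md : Int) (pos : List Int) : ∀ j ∈ bnd md pos, 1 ≤ j := by
  intro j hj
  simp only [bnd, List.mem_filter] at hj
  exact (PySem.List.mem_pyRange_one.mp hj.1).1

lemma bnd_cons (md h b : Int) (t : List Int) :
    bnd md (h :: b :: t)
      = if b > h + md then (1 : Int) :: (bnd md (b :: t)).map (· + 1)
        else (bnd md (b :: t)).map (· + 1) := by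
  have hg1 : PySem.List.pyGetD (h :: b :: t) 1 0 = b := by
    have := pyGetD_cons_shift h (b :: t) 0 (le_refl 0)
    norm_num at this
    simpa [PySem.List.pyGetD_zero_cons] using this
  have hg0 : PySem.List.pyGetD (h :: b :: t) 0 0 = h := PySem.List.pyGetD_zero_cons h (b :: t) 0
  have hlen2 : ((( h :: b :: t).length : Int)) = ((b :: t).length : Int) + 1 := by
    push_cast [List.length_cons]; ring
  have hrange : PySem.List.pyRange 1 (((h :: b :: t).length : Int)) 1
      = 1 :: (PySem.List.pyRange 1 (((b :: t).length : Int)) 1).map (· + 1) := by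
    rw [hlen2, PySem.List.pyRange_one_cons (by simp)]
    rw [show PySem.List.pyRange (1 + 1) (((b :: t).length : Int) + 1) 1
        = (PySem.List.pyRange 1 (((b :: t).length : Int)) 1).map (· + 1) from pyRange_shift 1 _]
  unfold bnd
  rw [hrange, List.filter_cons]
  rw [List.filter_map]
  have hfc : List.filter
      ((fun i => decide (PySem.List.pyGetD (h :: b :: t) i 0 >
        PySem.List.pyGetD (h :: b :: t) (i - 1) 0 + md)) ∘ (· + 1))
      (PySem.List.pyRange 1 (((b :: t).length : Int)) 1)
      = List.filter (fun i => decide (PySem.List.pyGetD (b :: t) i 0 >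
        PySem.List.pyGetD (b :: t) (i - 1) 0 + md))
        (PySem.List.pyRange 1 (((b :: t).length : Int)) 1) := by
    apply List.filter_congr
    intro i hi
    have hi1 : 1 ≤ i := (PySem.List.mem_pyRange_one.mp hi).1
    have e1 : PySem.List.pyGetD (h :: b :: t) (i + 1) 0 = PySem.List.pyGetD (b :: t) i 0 :=
      pyGetD_cons_shift h (b :: t) i (by omega)
    have e2 : PySem.List.pyGetD (h :: b :: t) (i + 1 - 1) 0
        = PySem.List.pyGetD (b :: t) (i - 1) 0 := by
      rw [show i + 1 - 1 = (i - 1) + 1 by ring]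
      exact pyGetD_cons_shift h (b :: t) (i - 1) (by omega)
    simp only [Function.comp, e1, e2]
  rw [hfc]
  by_cases hb : b > h + md
  · rw [if_pos hb]
    have : (decide (PySem.List.pyGetD (h :: b :: t) 1 0 >
        PySem.List.pyGetD (h :: b :: t) (1 - 1) 0 + md)) = true := by
      norm_num [hg1, hg0]; omega
    simp only [this, if_pos]
  · rw [if_neg hb]
    have : (decide (PySem.List.pyGetD (h :: b :: t) 1 0 >
        PySem.List.pyGetD (h :: b :: t) (1 - 1) 0 + md)) = false := by
      norm_num [hg1, hg0]; omega
    simp only [this]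
    simp

lemma shifted_pairs (x : Int) (l : List Int) (hl : l ≠ []) (bs : List Int)
    (hbs : ∀ j ∈ bs, 1 ≤ j) :
    (windows 1 (bs.map (· + 1)) ((l.length : Int) + 1)).map (pairFn (x :: l))
      = (windows 0 bs (l.length : Int)).map (pairFn l) := by
  have hw := windows_shift bs 0 ((l.length : Int))
  norm_num at hw
  rw [hw, List.map_map]
  apply List.map_congr_left
  intro p hp
  obtain ⟨hp1, hp2⟩ := windows_mem bs 0 (l.length : Int) p hp
  have hp1' : 0 ≤ p.1 := by
    rcases hp1 with h | h
    · simp [h]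
    · linarith [hbs _ h]
  have hp2' : 1 ≤ p.2 := by
    rcases hp2 with h | h
    · exact hbs _ h
    · have : l.length ≠ 0 := fun h0 => hl (List.eq_nil_of_length_eq_zero h0)
      omega
  show pairFn (x :: l) (p.1 + 1, p.2 + 1) = pairFn l p
  unfold pairFn
  dsimp only
  rw [show p.2 + 1 - 1 = (p.2 - 1) + 1 by ring,
    pyGetD_cons_shift x l p.1 hp1', pyGetD_cons_shift x l (p.2 - 1) (by omega)]

lemma main_pairs (md : Int) (t : List Int) (h : Int) :
    (windows 0 (bnd md (h :: t)) (((h :: t).length : Int))).map (pairFn (h :: t))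
      = segFL md h h t := by
  induction t generalizing h with
  | nil =>
    have hb : bnd md [h] = [] := by
      simp [bnd]
    simp [hb, windows, segFL, pairFn, PySem.List.pyGetD_zero_cons]
  | cons b t ih =>
    have hmem := bnd_mem md (b :: t)
    have hlen : (((h :: b :: t).length : Int)) = ((b :: t).length : Int) + 1 := by
      push_cast [List.length_cons]; ring
    have hfirst0 : PySem.List.pyGetD (h :: b :: t) 0 0 = h :=
      PySem.List.pyGetD_zero_cons h (b :: t) 0
    by_cases hgap : b > h + md
    · rw [bnd_cons md h b t, if_pos hgap, hlen]
      have hw : windows 0 (1 :: (bnd md (b :: t)).map (· + 1)) (((b :: t).length : Int) + 1)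
          = (0, 1) :: windows 1 ((bnd md (b :: t)).map (· + 1)) (((b :: t).length : Int) + 1) := rfl
      rw [hw, List.map_cons,
        shifted_pairs h (b :: t) (by simp) (bnd md (b :: t)) hmem, ih b]
      have hfc : pairFn (h :: b :: t) (0, 1) = (h, h) := by
        simp [pairFn, PySem.List.pyGetD_zero_cons]
      rw [hfc]
      rw [show segFL md h h (b :: t) = (h, h) :: segFL md b b t from by
        simp [segFL, show ¬ b ≤ h + md by omega]]
    · rw [bnd_cons md h b t, if_neg hgap, hlen]
      obtain ⟨z, r, hzr⟩ := segFL_exists md b t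
      obtain ⟨y, rest, hw0, hw1⟩ := windows_map_first (pairFn (h :: b :: t))
        ((bnd md (b :: t)).map (· + 1)) (((b :: t).length : Int) + 1) 0 1
      have hshift : (windows 1 ((bnd md (b :: t)).map (· + 1)) (((b :: t).length : Int) + 1)).map
          (pairFn (h :: b :: t)) = (b, z) :: r := by
        rw [shifted_pairs h (b :: t) (by simp) (bnd md (b :: t)) hmem, ih b, hzr b]
      rw [hw1] at hshift
      have hhead : pairFn (h :: b :: t) (1, y) = (b, z) := (List.cons.injEq _ _ _ _ ▸ hshift).1
      have htail : rest = r := (List.cons.injEq _ _ _ _ ▸ hshift).2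
      rw [hw0, htail]
      have hfc : pairFn (h :: b :: t) (0, y) = (h, z) := by
        have h2 : (pairFn (h :: b :: t) (0, y)).2 = (pairFn (h :: b :: t) (1, y)).2 := rfl
        have h1 : (pairFn (h :: b :: t) (0, y)).1 = h := hfirst0
        rw [Prod.ext_iff]
        exact ⟨h1, by rw [h2, hhead]⟩
      rw [hfc]
      rw [show segFL md h h (b :: t) = segFL md h b t from by simp [segFL, hgap], hzr h]

lemma foldl_app2 {α : Type} (l : List α) (f : α → String) (g : α → Int × Int)
    (xs : List String) (ys : List (Int × Int)) :
    l.foldl (fun acc a => (acc.1 ++ [f a], acc.2 ++ [g a])) (xs, ys)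
      = (xs ++ l.map f, ys ++ l.map g) := by
  induction l generalizing xs ys with
  | nil => simp
  | cons a l ih => simp [ih]

lemma innerA_char (md : Int) (chrom : String) (t : List Int) :
    ∀ (ls : List String) (rs : List (Int × Int)) (f c : Int),
      (let st := t.foldl (innerA md chrom) (ls, rs, f, c)
       (st.1 ++ [chrom], st.2.1 ++ [(max (st.2.2.1 - md) 0, st.2.2.2 + md)]))
      = (ls ++ (segFL md f c t).map (fun _ => chrom),
         rs ++ (segFL md f c t).map (rangeFn md)) := by
  induction t with
  | nil => intro ls rs f c; simp [segFL, rangeFn]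
  | cons b t ih =>
    intro ls rs f c
    by_cases hb : b ≤ c + md
    · simpa [innerA, hb, segFL] using ih ls rs f b
    · have := ih (ls ++ [chrom]) (rs ++ [(max (f - md) 0, c + md)]) b b
      simp only [List.foldl_cons, innerA, if_neg hb]
      rw [this]
      simp [segFL, hb, rangeFn]

lemma step_eq (md : Int) (acc : List String × List (Int × Int)) (kv : String × List Int)
    (hkv : kv.2 ≠ []) : stepA md acc kv = stepB md acc kv := by
  obtain ⟨chrom, pos⟩ := kv
  obtain ⟨ls, rs⟩ := acc
  obtain ⟨h, t, rfl⟩ : ∃ h t, pos = h :: t := by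
    cases pos with
    | nil => exact absurd rfl hkv
    | cons h t => exact ⟨h, t, rfl⟩
  have hB : stepB md (ls, rs) (chrom, h :: t)
      = (ls ++ (windows 0 (bnd md (h :: t)) (((h :: t).length : Int))).map (fun _ => chrom),
         rs ++ (windows 0 (bnd md (h :: t)) (((h :: t).length : Int))).map
           (fun ab => rangeFn md (pairFn (h :: t) ab))) := by
    unfold stepB
    dsimp only
    rw [zip_windows]
    exact foldl_app2 _ (fun _ => chrom) (fun ab => rangeFn md (pairFn (h :: t) ab)) ls rs
  have hA : stepA md (ls, rs) (chrom, h :: t)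
      = (ls ++ (segFL md h h t).map (fun _ => chrom),
         rs ++ (segFL md h h t).map (rangeFn md)) := by
    unfold stepA
    simpa using innerA_char md chrom t ls rs h h
  rw [hA, hB]
  have hpairs := main_pairs md t h
  have hlen : (windows 0 (bnd md (h :: t)) (((h :: t).length : Int))).length
      = (segFL md h h t).length := by
    rw [← hpairs, List.length_map]
  have hlabels : (windows 0 (bnd md (h :: t)) (((h :: t).length : Int))).map
      (fun _ => chrom) = (segFL md h h t).map (fun _ => chrom) := by
    rw [List.map_const', List.map_const', hlen]
  have hranges : (windows 0 (bnd md (h :: t)) (((h :: t).length : Int))).map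
      (fun ab => rangeFn md (pairFn (h :: t) ab)) = (segFL md h h t).map (rangeFn md) := by
    rw [show (fun ab => rangeFn md (pairFn (h :: t) ab))
        = rangeFn md ∘ pairFn (h :: t) from rfl, ← List.map_map, hpairs]
  rw [hlabels, hranges]

lemma fold_eq (md : Int) (breaks : List (String × List Int)) :
    ∀ acc, (∀ kv ∈ breaks, kv.2 ≠ []) →
      breaks.foldl (stepA md) acc = breaks.foldl (stepB md) acc := by
  induction breaks with
  | nil => intro acc _; rfl
  | cons kv rest ih =>
    intro acc hpre
    simp only [List.foldl_cons]
    rw [step_eq md acc kv (hpre kv (by simp))]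
    exact ih _ (fun k hk => hpre k (by simp [hk]))

-- ===== VERDICT (by name: the statement is the Claim_ definition above) =====
theorem generateVertices_spec : Claim_equal_generateVertices := by
  intro breaks md _ hpre
  unfold Spec_generateVertices
  rw [genA_eq_foldl, genB_eq_foldl]
  exact fold_eq md breaks ([], []) hpre
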